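-- pv_equiv track=rewrite | github.com/MahdinOhi/problemSolved | CodeForces/1898A.py | min_operations_to_k_Bs
-- ===== SOURCE A (Python) =====
-- def min_operations_to_k_Bs(test_cases):
--     # Create a list to store results for all test cases
--     results = []
--
--     # Loop through each test case
--     for case in test_cases:
--         n, k, s = case  # Unpack the test case values
--         # Count the number of 'B's in the current string
--         current_b_count = s.count('B')
--
--         # If the current count of 'B's is already equal to k, no operations are needed
--         if current_b_count == k:
--             # Append (0, []) indicating 0 operations needed
--             results.append((0, []))
--             continue  # Move to the next test case
--
--         operations = []  # List to store the operations for the current test case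
--
--         if current_b_count > k:
--             # If there are more 'B's than needed, we need to convert some 'B's to 'A's
--             # Calculate how many 'B's need to be converted to 'A's
--             needed_a_count = current_b_count - k
--             count = 0  # Counter to keep track of how many 'B's we have found so far
--             for i in range(n):
--                 if s[i] == 'B':  # If the current character is 'B'
--                     count += 1  # Increment the count of 'B's found
--                 if count == needed_a_count:  # If we have found enough 'B's to convert
--                     # Record the operation to convert the first (i + 1) characters to 'A'
--                     operations.append((i + 1, 'A'))
--                     break  # Exit the loop since we have the required operation
--         else:
--             # If there are fewer 'B's than needed, we need to convert some 'A's to 'B's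
--             # Calculate how many 'A's need to be converted to 'B's
--             needed_b_count = k - current_b_count
--             count = 0  # Counter to keep track of how many 'A's we have found so far
--             for i in range(n):
--                 if s[i] == 'A':  # If the current character is 'A'
--                     count += 1  # Increment the count of 'A's found
--                 if count == needed_b_count:  # If we have found enough 'A's to convert
--                     # Record the operation to convert the first (i + 1) characters to 'B'
--                     operations.append((i + 1, 'B'))
--                     break  # Exit the loop since we have the required operation
--
--         # Append the number of operations and the operations themselves to the results
--         results.append((len(operations), operations))
--
--     return results  # Return the results for all test cases
-- ===== SOURCE B (Python) =====
-- def min_operations_to_k_Bs(test_cases):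
--     results = []
--     for n, k, s in test_cases:
--         b_total = s.count('B')
--         if b_total == k:
--             results.append((0, []))
--             continue
--         if b_total > k:
--             # flip a prefix to 'A': the B's remaining are exactly those in the suffix
--             target, label, keep = 'B', 'A', k
--         else:
--             # flip a prefix to 'B': the A's remaining must be total A's minus those converted
--             target, label, keep = 'A', 'B', s.count('A') - (k - b_total)
--         # suf[j] = occurrences of target in s[j:], filled right-to-left
--         suf = [0] * (len(s) + 1)
--         for j in range(len(s) - 1, -1, -1):
--             suf[j] = suf[j + 1] + (s[j] == target)
--         ops = []
--         for p in range(1, min(n, len(s)) + 1):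
--             if suf[p] == keep:
--                 ops = [(p, label)]
--                 break
--         results.append((len(ops), ops))
--     return results
-- ===== Notes on version B (the rewrite author's own statement) =====
-- stated objective: alternative
-- what changed: B replaces A's forward counting scan with break by a precomputed suffix-count table (built right-to-left) and then picks the first prefix length whose remaining-suffix occurrence count hits the required value; no occurrence counter is maintained while scanning.
-- outside the precondition, e.g. on min_operations_to_k_Bs([(2, 1, '')]): A raises IndexError, B returns [(0, [])]
import Mathlib
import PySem

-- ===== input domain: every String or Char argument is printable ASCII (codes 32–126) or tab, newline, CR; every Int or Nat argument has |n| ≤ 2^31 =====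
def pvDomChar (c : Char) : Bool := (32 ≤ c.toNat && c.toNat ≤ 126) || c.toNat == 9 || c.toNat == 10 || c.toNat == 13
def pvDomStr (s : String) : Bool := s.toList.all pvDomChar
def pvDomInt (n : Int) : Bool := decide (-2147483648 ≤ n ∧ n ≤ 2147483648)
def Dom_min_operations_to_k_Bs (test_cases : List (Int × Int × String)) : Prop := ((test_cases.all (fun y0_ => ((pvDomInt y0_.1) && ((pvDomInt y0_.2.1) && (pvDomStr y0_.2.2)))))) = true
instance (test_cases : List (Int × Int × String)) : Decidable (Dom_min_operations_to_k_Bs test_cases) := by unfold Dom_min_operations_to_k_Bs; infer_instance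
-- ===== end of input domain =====

-- B replaces A's forward counting scan-with-break by a right-to-left suffix-count
-- table plus a search for the first prefix length whose remaining-suffix count
-- hits the required value (objective: alternative).

-- ===== PORT A =====
-- the inner 'for i in range(n): … break' loop; s[i] is pyGetD (IndexError inputs are excluded by Pre_)
def pvLoopA (cs : List Char) (target : Char) (label : String) (need n : Int)
    (i count : Int) : List (Int × String) :=
  if h : i < n then
    let c := PySem.List.pyGetD cs i ' '
    let count' := if c = target then count + 1 else count
    if count' = need then [(i + 1, label)] else pvLoopA cs target label need n (i + 1) count'
  else []
termination_by (n - i).toNat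
decreasing_by omega

def pvCaseA (case : Int × Int × String) : Int × List (Int × String) :=
  let (n, k, s) := case
  let current_b_count : Int := (PySem.Str.count s "B" : Int)
  if current_b_count = k then (0, [])
  else if current_b_count > k then
    let operations := pvLoopA s.toList 'B' "A" (current_b_count - k) n 0 0
    ((operations.length : Int), operations)
  else
    let operations := pvLoopA s.toList 'A' "B" (k - current_b_count) n 0 0
    ((operations.length : Int), operations)

def min_operations_to_k_Bs (test_cases : List (Int × Int × String)) : List (Int × (List (Int × String))) :=
  test_cases.map pvCaseA

-- ===== PORT B =====
-- suf[j] = occurrences of target in s[j:], python's right-to-left fill loop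
def pvSuf (t : Char) : List Char → List Int
  | [] => [0]
  | x :: xs =>
    let r := pvSuf t xs
    (r.headD 0 + (if x = t then 1 else 0)) :: r

-- 'for p in range(1, limit+1): if suf[p] == keep: break', walking suf[1:]
def pvSearchB (keep limit : Int) : List Int → Int → Option Int
  | [], _ => none
  | v :: rest, p =>
    if p ≤ limit then
      if v = keep then some p else pvSearchB keep limit rest (p + 1)
    else none

def pvCaseB (case : Int × Int × String) : Int × List (Int × String) :=
  let (n, k, s) := case
  let b_total : Int := (PySem.Str.count s "B" : Int)
  if b_total = k then (0, [])
  else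
    let (target, label, keep) :=
      if b_total > k then ('B', "A", k)
      else ('A', "B", (PySem.Str.count s "A" : Int) - (k - b_total))
    let suf := pvSuf target s.toList
    let ops : List (Int × String) :=
      match pvSearchB keep (min n ((PySem.Str.len s : Int))) suf.tail 1 with
      | some p => [(p, label)]
      | none => []
    ((ops.length : Int), ops)

def min_operations_to_k_Bs_alt (test_cases : List (Int × Int × String)) : List (Int × (List (Int × String))) :=
  test_cases.map pvCaseB

-- ===== PRECONDITION & SPEC =====
-- A raises IndexError on a case whose n exceeds len(s) while the needed occurrence
-- is missing from s; Pre_ admits exactly the inputs on which A returns.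
def pvPreCase (case : Int × Int × String) : Bool :=
  let (n, k, s) := case
  let cb : Int := (PySem.Str.count s "B" : Int)
  cb == k || n ≤ (PySem.Str.len s : Int) ||
    (if cb > k then 0 ≤ k else k ≤ cb + (PySem.Str.count s "A" : Int))

def Pre_min_operations_to_k_Bs (test_cases : List (Int × Int × String)) : Prop :=
  test_cases.all pvPreCase = true
instance (test_cases : List (Int × Int × String)) : Decidable (Pre_min_operations_to_k_Bs test_cases) := by unfold Pre_min_operations_to_k_Bs; infer_instance

def pvWitness_min_operations_to_k_Bs : (List (Int × Int × String)) :=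
  [(3, 1, "ABA"), (4, 2, "BBBB"), (2, 2, "AA")]

def Spec_min_operations_to_k_Bs (test_cases : List (Int × Int × String)) (out : List (Int × (List (Int × String)))) : Prop := out = min_operations_to_k_Bs_alt test_cases
instance (test_cases : List (Int × Int × String)) (out : List (Int × (List (Int × String)))) : Decidable (Spec_min_operations_to_k_Bs test_cases out) := by unfold Spec_min_operations_to_k_Bs; infer_instance

-- ===== CLAIM (what is proved, stated in full; the proofs are below) =====
def Claim_equal_min_operations_to_k_Bs : Prop := ∀ (test_cases : List (Int × Int × String)), Dom_min_operations_to_k_Bs test_cases → Pre_min_operations_to_k_Bs test_cases → Spec_min_operations_to_k_Bs test_cases (min_operations_to_k_Bs test_cases)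

-- ===== LEMMAS AND PROOFS =====

-- proof-side abstraction: first position p (starting at p, bounded by limit) at which
-- the running requirement of target characters reaches zero
def pvFirst (c : Char) : Int → Int → List Char → Int → Option Int
  | _, _, [], _ => none
  | need, limit, x :: xs, p =>
    if p ≤ limit then
      let need' := if x = c then need - 1 else need
      if need' = 0 then some p else pvFirst c need' limit xs (p + 1)
    else none

theorem pvSuf_headD (c : Char) : ∀ (xs : List Char), (pvSuf c xs).headD 0 = (xs.count c : Int) := by
  intro xs
  induction xs with
  | nil => simp [pvSuf]
  | cons x xs ih =>
    simp only [pvSuf, List.headD_cons, ih, List.count_cons]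
    by_cases hx : x = c <;> simp [hx]

theorem pvSuf_cons_count (c : Char) (xs : List Char) :
    pvSuf c xs = (xs.count c : Int) :: (pvSuf c xs).tail := by
  cases xs with
  | nil => simp [pvSuf]
  | cons y ys =>
    simp only [pvSuf, List.tail_cons]
    rw [pvSuf_headD, List.count_cons]
    by_cases hy : y = c <;> simp [hy]

-- B's search over the suffix table = pvFirst
theorem pvSearch_eq_first (c : Char) : ∀ (xs : List Char) (need p limit : Int),
    pvSearchB ((xs.count c : Int) - need) limit (pvSuf c xs).tail p = pvFirst c need limit xs p := by
  intro xs
  induction xs with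
  | nil => intro need p limit; simp [pvSuf, pvSearchB, pvFirst]
  | cons x xs ih =>
    intro need p limit
    have htail : (pvSuf c (x :: xs)).tail = pvSuf c xs := by simp [pvSuf]
    rw [htail, pvSuf_cons_count]
    simp only [pvSearchB, pvFirst]
    by_cases hp : p ≤ limit
    · rw [if_pos hp, if_pos hp]
      have hcnt : ((x :: xs).count c : Int) = (xs.count c : Int) + (if x = c then 1 else 0) := by
        rw [List.count_cons]; by_cases hx : x = c <;> simp [hx]
      by_cases hx : x = c
      · simp only [hx, if_true] at hcnt ⊢
        rw [hcnt]
        by_cases hz : need - 1 = 0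
        · rw [if_pos (by omega), if_pos hz]
        · rw [if_neg (by omega), if_neg hz,
            (by ring : (xs.count c : Int) + 1 - need = (xs.count c : Int) - (need - 1)), ih]
      · simp only [hx, if_false] at hcnt ⊢
        rw [hcnt, add_zero]
        by_cases hz : need = 0
        · rw [if_pos (by omega), if_pos hz]
        · rw [if_neg (by omega), if_neg hz, ih]
    · rw [if_neg hp, if_neg hp]

-- A's loop past the end of the string scans only the ' ' default and finds nothing
theorem pvLoopA_past_end (cs : List Char) (t : Char) (lab : String) (need n : Int)
    (ht : t ≠ ' ') : ∀ (fuel : Nat) (off cnt : Int), 0 ≤ off → (n - off).toNat = fuel →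
    (cs.length : Int) ≤ off → cnt < need →
    pvLoopA cs t lab need n off cnt = [] := by
  intro fuel
  induction fuel with
  | zero =>
    intro off cnt h0 hf hlen hc
    rw [pvLoopA, dif_neg (by omega : ¬ off < n)]
  | succ m ih =>
    intro off cnt h0 hf hlen hc
    by_cases hoff : off < n
    · rw [pvLoopA, dif_pos hoff]
      have hget : PySem.List.pyGetD cs off ' ' = ' ' := by
        rw [PySem.List.pyGetD_of_nonneg _ _ h0, List.getD_eq_default _ _ (by omega)]
      simp only [hget, if_neg (Ne.symm ht)]
      rw [if_neg (by omega : ¬ cnt = need)]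
      exact ih (off + 1) cnt (by omega) (by omega) (by omega) hc
    · rw [pvLoopA, dif_neg hoff]

-- A's loop = pvFirst over the remaining characters
theorem pvLoopA_eq_first (cs : List Char) (t : Char) (lab : String) (need n : Int)
    (ht : t ≠ ' ') : ∀ (rest : List Char) (off cnt : Int), 0 ≤ off →
    rest = cs.drop off.toNat → cnt < need →
    pvLoopA cs t lab need n off cnt =
      (match pvFirst t (need - cnt) (min n (cs.length : Int)) rest (off + 1) with
       | some p => [(p, lab)]
       | none => []) := by
  intro rest
  induction rest generalizing cs with
  | nil =>
    intro off cnt h0 hrest hc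
    have hlen : (cs.length : Int) ≤ off := by
      have := List.drop_eq_nil_iff.mp hrest.symm
      omega
    rw [pvLoopA_past_end cs t lab need n ht (n - off).toNat off cnt h0 rfl hlen hc]
    simp [pvFirst]
  | cons x xs ih =>
    intro off cnt h0 hrest hc
    have hlt : off.toNat < cs.length := by
      by_contra hge
      rw [List.drop_eq_nil_of_le (by omega)] at hrest
      simp at hrest
    have hx : cs[off.toNat] = x := by
      have := List.drop_eq_getElem_cons hlt
      rw [this] at hrest
      exact (List.cons.injEq _ _ _ _ ▸ hrest).1.symm
    have hxs : xs = cs.drop (off + 1).toNat := by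
      have := List.drop_eq_getElem_cons hlt
      rw [this] at hrest
      have h1 : (off + 1).toNat = off.toNat + 1 := by omega
      rw [h1]
      exact (List.cons.injEq _ _ _ _ ▸ hrest).2
    by_cases hoff : off < n
    · rw [pvLoopA, dif_pos hoff]
      have hget : PySem.List.pyGetD cs off ' ' = x := by
        rw [PySem.List.pyGetD_of_nonneg _ _ h0, List.getD_eq_getElem _ _ hlt, hx]
      have hguard : off + 1 ≤ min n (cs.length : Int) := by
        simp only [le_min_iff]
        omega
      simp only [hget, pvFirst, if_pos hguard]
      by_cases hxt : x = t
      · simp only [hxt, if_true]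
        by_cases hdone : cnt + 1 = need
        · rw [if_pos hdone, if_pos (by omega : need - cnt - 1 = 0)]
        · rw [if_neg hdone, if_neg (by omega : ¬ need - cnt - 1 = 0)]
          rw [ih cs (off + 1) (cnt + 1) (by omega) hxs (by omega)]
          have : need - cnt - 1 = need - (cnt + 1) := by ring
          rw [this]
      · simp only [hxt, if_false]
        rw [if_neg (by omega : ¬ cnt = need), if_neg (by omega : ¬ need - cnt = 0)]
        exact ih cs (off + 1) cnt (by omega) hxs hc
    · rw [pvLoopA, dif_neg hoff]
      have hguard : ¬ off + 1 ≤ min n (cs.length : Int) := by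
        simp only [le_min_iff]
        omega
      simp only [pvFirst]
      rw [if_neg hguard]

-- Python str.count with a single-character needle is the character count
theorem pvCountGo (c : Char) : ∀ (cs : List Char) (fuel acc : Nat), cs.length ≤ fuel →
    PySem.Chars.count.go [c] fuel cs acc = acc + cs.count c := by
  intro cs
  induction cs with
  | nil => intro fuel acc _; cases fuel <;> simp [PySem.Chars.count.go]
  | cons x t ih =>
    intro fuel acc hf
    cases fuel with
    | zero => simp at hf
    | succ f =>
      rw [PySem.Chars.count.go]
      simp only [List.isPrefixOf, List.drop_one, List.tail_cons, List.length_singleton]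
      by_cases hx : c = x
      · subst hx
        simp only [BEq.rfl, Bool.true_and, if_true]
        rw [ih f (acc + 1) (by simpa using hf)]
        simp
        omega
      · have hbeq : (c == x) = false := by simp [hx]
        simp only [hbeq, Bool.false_and, Bool.false_eq_true, if_false]
        rw [ih f acc (by simpa using hf)]
        simp [Ne.symm hx]

theorem pvCountSingle (cs : List Char) (c : Char) : PySem.Chars.count cs [c] = cs.count c := by
  simp only [PySem.Chars.count, List.isEmpty_cons, Bool.false_eq_true, if_false]
  rw [pvCountGo c cs cs.length 0 le_rfl, Nat.zero_add]

-- one test case: A's scanning branch equals B's suffix-table search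
theorem pvCase_eq (case : Int × Int × String) : pvCaseA case = pvCaseB case := by
  obtain ⟨n, k, s⟩ := case
  have hB : (PySem.Str.count s "B" : Int) = (s.toList.count 'B' : Int) := by
    rw [PySem.Str.count_eq, show "B".toList = ['B'] from rfl, pvCountSingle]
  have hA : (PySem.Str.count s "A" : Int) = (s.toList.count 'A' : Int) := by
    rw [PySem.Str.count_eq, show "A".toList = ['A'] from rfl, pvCountSingle]
  have hlen : ((PySem.Str.len s : Int)) = (s.toList.length : Int) := by simp only [pysem]
  simp only [pvCaseA, pvCaseB]
  by_cases h1 : (PySem.Str.count s "B" : Int) = k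
  · rw [if_pos h1, if_pos h1]
  · rw [if_neg h1, if_neg h1]
    by_cases h2 : (PySem.Str.count s "B" : Int) > k
    · rw [if_pos h2, if_pos h2]
      simp only
      rw [pvLoopA_eq_first s.toList 'B' "A" ((PySem.Str.count s "B" : Int) - k) n
            (by decide) s.toList 0 0 le_rfl (by simp) (by omega), hlen]
      have hs := pvSearch_eq_first 'B' s.toList ((PySem.Str.count s "B" : Int) - k) 1
        (min n (s.toList.length : Int))
      rw [show ((s.toList.count 'B' : Int) - ((PySem.Str.count s "B" : Int) - k)) = k from by
        omega] at hs
      rw [hs]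
      norm_num
    · rw [if_neg h2, if_neg h2]
      simp only
      rw [pvLoopA_eq_first s.toList 'A' "B" (k - (PySem.Str.count s "B" : Int)) n
            (by decide) s.toList 0 0 le_rfl (by simp) (by omega), hlen]
      have hs := pvSearch_eq_first 'A' s.toList (k - (PySem.Str.count s "B" : Int)) 1
        (min n (s.toList.length : Int))
      rw [show ((s.toList.count 'A' : Int) - (k - (PySem.Str.count s "B" : Int))) =
            ((PySem.Str.count s "A" : Int) - (k - (PySem.Str.count s "B" : Int))) from by
        omega] at hs
      rw [hs]
      norm_num

-- ===== VERDICT (by name: the statement is the Claim_ definition above) =====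
theorem min_operations_to_k_Bs_spec : Claim_equal_min_operations_to_k_Bs := by
  intro tc _ _
  unfold Spec_min_operations_to_k_Bs min_operations_to_k_Bs min_operations_to_k_Bs_alt
  exact List.map_congr_left fun c _ => pvCase_eq c
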